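-- pv_equiv track=rewrite | github.com/dpwls02142/codingtest | 프로그래머스/2/42586. 기능개발/기능개발.py | solution
-- ===== SOURCE A (Python) =====
-- from collections import deque
--
-- def solution(progresses, speeds):
--     answer = []
--     days = deque()
--     d = deque(progresses)
--     s = deque(speeds)
--     while d:
--         cnt = 0
--         a = d.popleft()
--         b = s.popleft()
--         while a < 100:
--             a += b
--             cnt += 1
--         days.append(cnt)
--     while days:
--         base_day = days.popleft()
--         count = 1
--         while days and days[0] <= base_day:
--             days.popleft()
--             count += 1
--         answer.append(count)
--     return answer
-- ===== SOURCE B (Python) =====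
-- def solution(progresses, speeds):
--     # closed-form ceiling division instead of the simulation loop, single grouping pass
--     days = [0 if p >= 100 else -((p - 100) // s) for p, s in zip(progresses, speeds)]
--     answer = []
--     base = 0
--     cnt = 0
--     for d in days:
--         if cnt and d <= base:
--             cnt += 1
--         else:
--             if cnt:
--                 answer.append(cnt)
--             base, cnt = d, 1
--     if cnt:
--         answer.append(cnt)
--     return answer
-- ===== Notes on version B (the rewrite author's own statement) =====
-- stated objective: simpler
-- what changed: Replaces the per-feature simulation while-loop with a closed-form ceiling division and the deque-popping grouping loops with one forward pass keeping (base, count) accumulators.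
import Mathlib
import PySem

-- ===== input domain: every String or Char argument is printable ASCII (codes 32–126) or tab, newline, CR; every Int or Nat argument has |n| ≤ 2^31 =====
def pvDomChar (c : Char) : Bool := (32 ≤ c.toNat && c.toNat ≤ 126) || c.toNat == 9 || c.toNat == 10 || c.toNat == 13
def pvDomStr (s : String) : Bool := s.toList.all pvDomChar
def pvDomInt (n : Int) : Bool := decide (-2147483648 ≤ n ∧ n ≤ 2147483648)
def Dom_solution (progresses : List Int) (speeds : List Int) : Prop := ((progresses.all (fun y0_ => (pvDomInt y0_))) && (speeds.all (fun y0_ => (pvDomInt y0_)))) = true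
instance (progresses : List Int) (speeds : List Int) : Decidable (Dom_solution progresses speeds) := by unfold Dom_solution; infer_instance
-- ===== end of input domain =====

-- B replaces A's step-by-step progress simulation with a closed-form ceiling division and
-- A's deque-popping grouping loops with one forward (base, count) accumulator pass (objective: simpler).

-- ===== PORT A =====
-- inner 'while a < 100: a += b; cnt += 1'; the '0 < b' guard only makes the
-- function total where Python loops forever (b ≤ 0 with a < 100, excluded by Pre_)
def pvInnerA (a b : Int) : Int :=
  if _h : a < 100 then
    if _hb : 0 < b then pvInnerA (a + b) b + 1 else 0
  else 0
termination_by (100 - a).toNat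
decreasing_by omega

-- outer 'while d:' popping both deques; a nonempty d with empty s raises IndexError in Python (excluded by Pre_)
def pvDaysA : List Int → List Int → List Int
  | [], _ => []
  | _ :: _, [] => []
  | a :: d, b :: s => pvInnerA a b :: pvDaysA d s

-- 'while days and days[0] <= base_day: popleft; count += 1'
def pvTakeGroup (base : Int) : List Int → Int × List Int
  | [] => (0, [])
  | x :: xs => if x ≤ base then ((pvTakeGroup base xs).1 + 1, (pvTakeGroup base xs).2) else (0, x :: xs)

theorem pvTakeGroup_len (base : Int) (xs : List Int) : (pvTakeGroup base xs).2.length ≤ xs.length := by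
  induction xs with
  | nil => simp [pvTakeGroup]
  | cons x xs ih =>
    simp only [pvTakeGroup]
    split
    · simp; omega
    · simp

-- 'while days: base_day = popleft; count = 1; <inner>; answer.append(count)'
def pvGroupA : List Int → List Int
  | [] => []
  | base :: rest => ((pvTakeGroup base rest).1 + 1) :: pvGroupA (pvTakeGroup base rest).2
termination_by xs => xs.length
decreasing_by have := pvTakeGroup_len base rest; simpa using Nat.lt_succ_of_le this

def solution (progresses : List Int) (speeds : List Int) : List Int :=
  pvGroupA (pvDaysA progresses speeds)

-- ===== PORT B =====
def pvDayB (p s : Int) : Int :=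
  if 100 ≤ p then 0 else -(PySem.Int.floordiv (p - 100) s)

def pvStepB (st : List Int × Int × Int) (d : Int) : List Int × Int × Int :=
  if st.2.2 ≠ 0 ∧ d ≤ st.2.1 then (st.1, st.2.1, st.2.2 + 1)
  else ((if st.2.2 ≠ 0 then st.1 ++ [st.2.2] else st.1), d, 1)

def solution_alt (progresses : List Int) (speeds : List Int) : List Int :=
  let days := (progresses.zip speeds).map (fun z => pvDayB z.1 z.2)
  let st := days.foldl pvStepB ([], 0, 0)
  if st.2.2 ≠ 0 then st.1 ++ [st.2.2] else st.1

-- ===== PRECONDITION & SPEC =====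
-- Pre_ excludes exactly the inputs on which A does not return: speeds shorter than
-- progresses (IndexError) and a feature with progress < 100 and speed ≤ 0 (A's inner loop diverges).
def Pre_solution (progresses : List Int) (speeds : List Int) : Prop :=
  progresses.length ≤ speeds.length ∧
  ((progresses.zip speeds).all (fun z => decide (100 ≤ z.1) || decide (0 < z.2))) = true
instance (progresses : List Int) (speeds : List Int) : Decidable (Pre_solution progresses speeds) := by
  unfold Pre_solution; infer_instance

def pvWitness_solution : List Int × List Int := ([93, 30, 55], [1, 30, 5])

def Spec_solution (progresses : List Int) (speeds : List Int) (out : List Int) : Prop := out = solution_alt progresses speeds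
instance (progresses : List Int) (speeds : List Int) (out : List Int) : Decidable (Spec_solution progresses speeds out) := by unfold Spec_solution; infer_instance

-- ===== CLAIM (what is proved, stated in full; the proofs are below) =====
def Claim_equal_solution : Prop := ∀ (progresses : List Int) (speeds : List Int), Dom_solution progresses speeds → Pre_solution progresses speeds → Spec_solution progresses speeds (solution progresses speeds)

-- ===== LEMMAS AND PROOFS =====

theorem pvInnerA_eq (n : Nat) (a b : Int) (hn : (100 - a).toNat ≤ n)
    (h : 100 ≤ a ∨ 0 < b) : pvInnerA a b = pvDayB a b := by
  induction n generalizing a with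
  | zero =>
    have ha : 100 ≤ a := by omega
    rw [pvInnerA, pvDayB]
    simp [not_lt.mpr ha, ha]
  | succ n ih =>
    by_cases ha : a < 100
    · have hb : 0 < b := by omega
      rw [pvInnerA]
      simp only [ha, hb, dif_pos]
      rw [ih (a + b) (by omega) (Or.inr hb)]
      rw [pvDayB, pvDayB]
      by_cases h2 : 100 ≤ a + b
      · simp only [h2, if_pos, if_neg (not_le.mpr ha)]
        have : PySem.Int.floordiv (a - 100) b = -1 := by
          rw [PySem.Int.floordiv_eq_iff_of_pos hb]
          constructor <;> omega
        rw [this]; ring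
      · simp only [if_neg h2, if_neg (not_le.mpr ha)]
        have e1 : a - 100 = (a + b - 100) + (-1) * b := by ring
        have e2 : PySem.Int.floordiv (a - 100) b = PySem.Int.floordiv (a + b - 100) b + (-1) := by
          rw [PySem.Int.floordiv_eq_ediv_of_pos hb, PySem.Int.floordiv_eq_ediv_of_pos hb, e1,
            Int.add_mul_ediv_right _ _ (by omega : b ≠ 0)]
        rw [e2]; ring
    · rw [pvInnerA, pvDayB]
      have ha' : 100 ≤ a := by omega
      simp [ha, ha']

theorem pvDaysA_eq (p : List Int) : ∀ (s : List Int), p.length ≤ s.length →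
    ((p.zip s).all (fun z => decide (100 ≤ z.1) || decide (0 < z.2))) = true →
    pvDaysA p s = (p.zip s).map (fun z => pvDayB z.1 z.2) := by
  induction p with
  | nil => intro s _ _; simp [pvDaysA]
  | cons a d ih =>
    intro s hl hall
    cases s with
    | nil => simp at hl
    | cons b s =>
      simp only [List.zip_cons_cons, List.all_cons, Bool.and_eq_true, Bool.or_eq_true,
        decide_eq_true_eq] at hall
      rw [pvDaysA, List.zip_cons_cons, List.map_cons,
        ih s (by simpa using hl) (by simpa using hall.2),
        pvInnerA_eq (100 - a).toNat a b le_rfl hall.1]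

theorem fold_group (rest : List Int) : ∀ (ans : List Int) (base cnt : Int), 0 < cnt →
    (let st := rest.foldl pvStepB (ans, base, cnt);
     if st.2.2 ≠ 0 then st.1 ++ [st.2.2] else st.1)
    = ans ++ (cnt + (pvTakeGroup base rest).1) :: pvGroupA (pvTakeGroup base rest).2 := by
  induction rest with
  | nil =>
    intro ans base cnt hc
    have hcne : cnt ≠ 0 := by omega
    simp [pvTakeGroup, pvGroupA, List.foldl, hcne]
  | cons x xs ih =>
    intro ans base cnt hc
    simp only [List.foldl_cons]
    by_cases hx : x ≤ base
    · have : pvStepB (ans, base, cnt) x = (ans, base, cnt + 1) := by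
        have hcne : cnt ≠ 0 := by omega
        simp [pvStepB, hx, hcne]
      rw [this, ih ans base (cnt + 1) (by omega)]
      simp only [pvTakeGroup, if_pos hx]
      congr 2
      ring
    · have : pvStepB (ans, base, cnt) x = (ans ++ [cnt], x, 1) := by
        have hcne : cnt ≠ 0 := by omega
        simp [pvStepB, hx, hcne]
      rw [this, ih (ans ++ [cnt]) x 1 (by omega)]
      simp only [pvTakeGroup, if_neg hx]
      rw [pvGroupA]
      simp only [List.append_assoc, List.cons_append, List.nil_append]
      congr 3 <;> omega

theorem groupB_eq (days : List Int) :
    (let st := days.foldl pvStepB ([], 0, 0);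
     if st.2.2 ≠ 0 then st.1 ++ [st.2.2] else st.1) = pvGroupA days := by
  cases days with
  | nil => simp [pvGroupA, List.foldl]
  | cons d rest =>
    simp only [List.foldl_cons]
    have : pvStepB ([], 0, 0) d = ([], d, 1) := by simp [pvStepB]
    rw [this]
    have := fold_group rest [] d 1 (by omega)
    simp only [List.nil_append] at this
    rw [this, pvGroupA, Int.add_comm]

-- ===== VERDICT (by name: the statement is the Claim_ definition above) =====
theorem solution_spec : Claim_equal_solution := by
  intro p s _ hpre
  unfold Spec_solution solution solution_alt
  rw [pvDaysA_eq p s hpre.1 hpre.2]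
  exact (groupB_eq _).symm
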